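-- pv_equiv track=rewrite | github.com/dohyungp/flyway-action | md_converter.py | change_to_markdown_format
-- ===== SOURCE A (Python) =====
-- def change_to_markdown_format(lines: str):
--
--     occured = 0
--
--     markdown = []
--     for line in lines.split("\n"):
--         if "+---" in line:
--             occured = occured + 1
--
--             # Only remain header line of markdown format
--             if occured != 2:
--                 continue
--
--             table_formatted = line.replace("+", "|")
--             markdown.append(table_formatted)
--         else:
--             markdown.append(line)
--     return "\n".join(markdown)
-- ===== SOURCE B (Python) =====
-- def change_to_markdown_format(lines: str):
--     ls = lines.split("\n")
--     borders = [i for i, line in enumerate(ls) if "+---" in line]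
--     keep = borders[1] if len(borders) > 1 else None
--     out = []
--     for i, line in enumerate(ls):
--         if "+---" not in line:
--             out.append(line)
--         elif i == keep:
--             out.append(line.replace("+", "|"))
--     return "\n".join(out)
-- ===== Notes on version B (the rewrite author's own statement) =====
-- stated objective: alternative
-- what changed: Replaced A's single stateful pass with a counter by a two-pass structure: first compute the list of indices of all table-border lines and pick the second one (if any), then a separate filter/rewrite pass over the enumerated lines keeps non-border lines, rewrites only the chosen border line, and drops the rest.
import Mathlib
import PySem

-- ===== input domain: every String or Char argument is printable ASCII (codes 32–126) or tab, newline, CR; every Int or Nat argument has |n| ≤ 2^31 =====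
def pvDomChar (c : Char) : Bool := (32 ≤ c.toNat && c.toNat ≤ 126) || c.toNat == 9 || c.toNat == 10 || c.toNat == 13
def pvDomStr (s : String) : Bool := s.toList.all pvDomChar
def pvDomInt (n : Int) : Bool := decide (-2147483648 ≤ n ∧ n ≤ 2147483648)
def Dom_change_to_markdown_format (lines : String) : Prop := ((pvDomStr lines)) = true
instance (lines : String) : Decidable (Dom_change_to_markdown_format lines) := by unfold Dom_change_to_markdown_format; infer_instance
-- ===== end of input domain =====

-- B replaces A's stateful counter-driven single pass by two passes: first compute the
-- indices of all table-border lines and pick the second, then filter/rewrite the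
-- enumerated lines against that chosen index (objective: alternative decomposition).

-- ===== PORT A =====
-- the loop body of A: state = (occured, markdown)
def pvStepA (st : Int × List String) (line : String) : Int × List String :=
  if PySem.Str.isIn "+---" line then
    let occured := st.1 + 1
    if occured ≠ 2 then (occured, st.2)
    else (occured, st.2 ++ [PySem.Str.replace line "+" "|"])
  else (st.1, st.2 ++ [line])

def change_to_markdown_format (lines : String) : String :=
  PySem.Str.join "\n" ((((PySem.Str.split? lines "\n").getD []).foldl pvStepA (0, [])).2)

-- ===== PORT B =====
-- the second-pass body of B: append a non-border line, the chosen border line replaced, else skip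
def pvStepB (keep : Option Int) (out : List String) (p : Int × String) : List String :=
  if ¬ PySem.Str.isIn "+---" p.2 then out ++ [p.2]
  else if some p.1 = keep then out ++ [PySem.Str.replace p.2 "+" "|"]
  else out

def change_to_markdown_format_alt (lines : String) : String :=
  let ls := (PySem.Str.split? lines "\n").getD []
  let borders := ((PySem.List.enumerate ls 0).filter (fun p => PySem.Str.isIn "+---" p.2)).map (·.1)
  let keep : Option Int := if borders.length > 1 then borders[1]? else none
  PySem.Str.join "\n" ((PySem.List.enumerate ls 0).foldl (pvStepB keep) [])

-- ===== PRECONDITION & SPEC =====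
def Spec_change_to_markdown_format (lines : String) (out : String) : Prop := out = change_to_markdown_format_alt lines
instance (lines : String) (out : String) : Decidable (Spec_change_to_markdown_format lines out) := by unfold Spec_change_to_markdown_format; infer_instance

-- ===== CLAIM (what is proved, stated in full; the proofs are below) =====
def Claim_equal_change_to_markdown_format : Prop := ∀ (lines : String), Dom_change_to_markdown_format lines → Spec_change_to_markdown_format lines (change_to_markdown_format lines)

-- ===== LEMMAS AND PROOFS =====

-- the indices (offset s) of the border lines of ls
def bordersOf (ls : List String) (s : Int) : List Int :=
  ((PySem.List.enumerate ls s).filter (fun p => PySem.Str.isIn "+---" p.2)).map (·.1)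

theorem bordersOf_cons (l : String) (ls : List String) (s : Int) :
    bordersOf (l :: ls) s =
      if PySem.Str.isIn "+---" l then s :: bordersOf ls (s + 1) else bordersOf ls (s + 1) := by
  simp only [bordersOf, PySem.List.enumerate_cons, List.filter_cons]
  split_ifs <;> simp

theorem mem_bordersOf_ge {ls : List String} {s j : Int} (h : j ∈ bordersOf ls s) : s ≤ j := by
  simp only [bordersOf, List.mem_map, List.mem_filter] at h
  obtain ⟨p, ⟨hp, _⟩, rfl⟩ := h
  obtain ⟨k, _, rfl⟩ := (PySem.List.mem_enumerate_iff _ _ _).1 hp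
  omega

theorem loop_eq (ls : List String) (s occ : Int) (md : List String) (k : Option Int)
    (hk : (occ = 0 ∧ k = (bordersOf ls s)[1]?) ∨ (occ = 1 ∧ k = (bordersOf ls s)[0]?) ∨
          (2 ≤ occ ∧ ∀ j, k = some j → j < s)) :
    (ls.foldl pvStepA (occ, md)).2 = (PySem.List.enumerate ls s).foldl (pvStepB k) md := by
  induction ls generalizing s occ md k with
  | nil => simp [PySem.List.enumerate_nil]
  | cons l ls ih =>
    simp only [List.foldl_cons, PySem.List.enumerate_cons]
    by_cases hb : PySem.Str.isIn "+---" l = true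
    · rw [bordersOf_cons, if_pos hb] at hk
      rcases hk with ⟨h0, hk⟩ | ⟨h1, hk⟩ | ⟨h2, hk⟩
      · -- occ = 0: A skips this first border; B skips it too (k points past s)
        subst h0
        have hkk : k = (bordersOf ls (s + 1))[0]? := by simpa using hk
        have hne : ¬ (some s = k) := by
          rw [hkk]
          rcases hq : (bordersOf ls (s + 1))[0]? with _ | j
          · simp
          · have := mem_bordersOf_ge (List.mem_of_getElem? hq)
            simp only [Option.some.injEq]
            omega
        simp only [pvStepA, pvStepB, hb]
        norm_num [hne]
        exact ih (s + 1) 1 md k (Or.inr (Or.inl ⟨rfl, hkk⟩))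
      · -- occ = 1: A keeps this (second) border replaced; k = some s so B keeps it too
        subst h1
        have hkk : k = some s := by simpa using hk
        simp only [pvStepA, pvStepB, hb]
        norm_num [hkk]
        exact ih (s + 1) 2 _ (some s)
          (Or.inr (Or.inr ⟨le_refl 2, by intro j hj; injection hj with hj; omega⟩))
      · -- occ ≥ 2: A skips all further borders; B does too (k lies before s)
        have hne : ¬ (some s = k) := by
          intro hes; have := hk s hes.symm; omega
        have hocc : occ + 1 ≠ 2 := by omega
        simp only [pvStepA, pvStepB, hb]
        norm_num [hne, hocc]
        exact ih (s + 1) (occ + 1) md k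
          (Or.inr (Or.inr ⟨by omega, by intro j hj; have := hk j hj; omega⟩))
    · -- non-border line: both append it unchanged
      rw [bordersOf_cons, if_neg hb] at hk
      simp only [pvStepA, pvStepB, hb]
      norm_num
      rcases hk with ⟨h0, hk⟩ | ⟨h1, hk⟩ | ⟨h2, hk⟩
      · subst h0; exact ih (s + 1) 0 _ k (Or.inl ⟨rfl, hk⟩)
      · subst h1; exact ih (s + 1) 1 _ k (Or.inr (Or.inl ⟨rfl, hk⟩))
      · exact ih (s + 1) occ _ k
          (Or.inr (Or.inr ⟨h2, by intro j hj; have := hk j hj; omega⟩))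

theorem keep_eq (bl : List Int) :
    (if bl.length > 1 then bl[1]? else none) = bl[1]? := by
  split_ifs with h
  · rfl
  · exact (List.getElem?_eq_none (by omega)).symm

-- ===== VERDICT (by name: the statement is the Claim_ definition above) =====
theorem change_to_markdown_format_spec : Claim_equal_change_to_markdown_format := by
  intro lines _
  unfold Spec_change_to_markdown_format
  simp only [change_to_markdown_format, change_to_markdown_format_alt, keep_eq]
  congr 1
  exact loop_eq _ 0 0 [] _ (Or.inl ⟨rfl, rfl⟩)
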